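-- pv_equiv track=rewrite | github.com/AlexCapis/HEATY---Aplicacion-Web-para-Olas-de-Calor | openAI/app.py | is_heatwave_related
-- ===== SOURCE A (Python) =====
-- def is_heatwave_related(question):
--     # Add your logic here to determine if the question is heatwave-related
--     # You can use simple keyword matching or more advanced NLP techniques
--     # For this example, let's assume we have a list of heatwave-related keywords
--     heatwave_keywords = ["heatwave",
--     "high temperature",
--     "extreme heat",
--     "heat index",
--     "heat advisory",
--     "heat stress",
--     "heat exhaustion",
--     "heatstroke",
--     "hot weather",
--     "sweltering",
--     "scorching",
--     "sunburn",
--     "dehydration",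
--     "hydration",
--     "air conditioning",
--     "fans",
--     "sunscreen",
--     "shade",
--     "water consumption",
--     "cooling centers",
--     "temperature",
--     "spf",
--     "heat emergency",
--     "climate",
--     "climate change"]
--
--     for keyword in heatwave_keywords:
--         if keyword in question.lower():
--             return True
--     return False
-- ===== SOURCE B (Python) =====
-- HEATWAVE_KEYWORDS = ["heatwave",
--     "high temperature",
--     "extreme heat",
--     "heat index",
--     "heat advisory",
--     "heat stress",
--     "heat exhaustion",
--     "heatstroke",
--     "hot weather",
--     "sweltering",
--     "scorching",
--     "sunburn",
--     "dehydration",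
--     "hydration",
--     "air conditioning",
--     "fans",
--     "sunscreen",
--     "shade",
--     "water consumption",
--     "cooling centers",
--     "temperature",
--     "spf",
--     "heat emergency",
--     "climate",
--     "climate change"]
--
--
-- def is_heatwave_related(question):
--     # single left-to-right pass over the lowered text: at each position,
--     # test whether some keyword starts there (position-major, not keyword-major)
--     q = question.lower()
--     for i in range(len(q)):
--         for k in HEATWAVE_KEYWORDS:
--             if q.startswith(k, i):
--                 return True
--     return False
-- ===== Notes on version B (the rewrite author's own statement) =====
-- stated objective: alternative
-- what changed: Replaces A's keyword-major loop of 25 independent full substring scans of the lowered question by a single position-major left-to-right pass over the lowered text that tests at each position whether any keyword starts there.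
import Mathlib
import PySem

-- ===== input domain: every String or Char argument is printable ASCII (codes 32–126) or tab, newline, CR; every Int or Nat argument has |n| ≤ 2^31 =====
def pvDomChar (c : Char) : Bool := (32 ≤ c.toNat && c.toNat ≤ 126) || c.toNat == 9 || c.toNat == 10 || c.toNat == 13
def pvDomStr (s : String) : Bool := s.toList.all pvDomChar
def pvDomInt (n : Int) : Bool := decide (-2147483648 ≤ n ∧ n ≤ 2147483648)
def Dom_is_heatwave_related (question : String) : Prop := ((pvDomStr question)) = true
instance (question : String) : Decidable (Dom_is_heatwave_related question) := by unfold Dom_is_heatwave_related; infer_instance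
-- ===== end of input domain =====

-- B replaces A's keyword-major loop of 25 separate substring scans by one
-- position-major pass over the lowered text (alternative decomposition, same cost).

def pvKeywords : List String := ["heatwave",
  "high temperature",
  "extreme heat",
  "heat index",
  "heat advisory",
  "heat stress",
  "heat exhaustion",
  "heatstroke",
  "hot weather",
  "sweltering",
  "scorching",
  "sunburn",
  "dehydration",
  "hydration",
  "air conditioning",
  "fans",
  "sunscreen",
  "shade",
  "water consumption",
  "cooling centers",
  "temperature",
  "spf",
  "heat emergency",
  "climate",
  "climate change"]

-- ===== PORT A =====
-- A's loop: for keyword in heatwave_keywords: if keyword in question.lower(): return True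
def pvScanA (kws : List String) (question : String) : Bool :=
  match kws with
  | [] => false
  | k :: rest => if PySem.Str.isIn k (PySem.Str.lower question) then true else pvScanA rest question

def is_heatwave_related (question : String) : Bool :=
  pvScanA pvKeywords question

-- ===== PORT B =====
-- B's loops: q = question.lower(); for i in range(len(q)): for k in KEYWORDS: if q.startswith(k, i): return True
-- (each recursive step on the char list is one position i; startswith(k, i) = Chars.startswith on the suffix)
def pvScanB (kws : List (List Char)) : List Char → Bool
  | [] => false
  | c :: t => if kws.any (fun k => PySem.Chars.startswith (c :: t) k) then true else pvScanB kws t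

def is_heatwave_related_alt (question : String) : Bool :=
  pvScanB (pvKeywords.map String.toList) (PySem.Chars.lower question.toList)

-- ===== PRECONDITION & SPEC =====
def Spec_is_heatwave_related (question : String) (out : Bool) : Prop := out = is_heatwave_related_alt question
instance (question : String) (out : Bool) : Decidable (Spec_is_heatwave_related question out) := by unfold Spec_is_heatwave_related; infer_instance

-- ===== CLAIM (what is proved, stated in full; the proofs are below) =====
def Claim_equal_is_heatwave_related : Prop := ∀ (question : String), Dom_is_heatwave_related question → Spec_is_heatwave_related question (is_heatwave_related question)

-- ===== LEMMAS AND PROOFS =====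

theorem pvScanA_eq_any (kws : List String) (q : String) :
    pvScanA kws q = kws.any (fun k => PySem.Str.isIn k (PySem.Str.lower q)) := by
  induction kws with
  | nil => rfl
  | cons k rest ih => simp [pvScanA, ih]

theorem pvScanB_iff (kws : List (List Char)) (hne : ∀ k ∈ kws, k ≠ []) (l : List Char) :
    pvScanB kws l = true ↔ ∃ k ∈ kws, k <:+: l := by
  induction l with
  | nil =>
    simp only [pvScanB, Bool.false_eq_true, false_iff]
    rintro ⟨k, hk, hinf⟩
    exact hne k hk (List.eq_nil_of_infix_nil hinf)
  | cons c t ih =>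
    simp only [pvScanB]
    split_ifs with h
    · simp only [true_iff]
      simp only [List.any_eq_true, PySem.Chars.startswith_iff] at h
      obtain ⟨k, hk, hpre⟩ := h
      exact ⟨k, hk, hpre.isInfix⟩
    · rw [ih]
      constructor
      · rintro ⟨k, hk, hinf⟩
        exact ⟨k, hk, hinf.trans (List.suffix_cons c t).isInfix⟩
      · rintro ⟨k, hk, hinf⟩
        obtain ⟨s, hpre, hsuf⟩ := List.infix_iff_prefix_suffix.mp hinf
        rcases List.suffix_cons_iff.mp hsuf with rfl | hsuf'
        · exact absurd (by simp only [List.any_eq_true, PySem.Chars.startswith_iff]; exact ⟨k, hk, hpre⟩) h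
        · exact ⟨k, hk, List.infix_iff_prefix_suffix.mpr ⟨s, hpre, hsuf'⟩⟩

theorem pvKeywords_ne_nil : ∀ k ∈ pvKeywords.map String.toList, k ≠ [] := by decide

-- ===== VERDICT (by name: the statement is the Claim_ definition above) =====
theorem is_heatwave_related_spec : Claim_equal_is_heatwave_related := by
  intro q _
  unfold Spec_is_heatwave_related is_heatwave_related is_heatwave_related_alt
  rw [pvScanA_eq_any, Bool.eq_iff_iff, pvScanB_iff _ pvKeywords_ne_nil]
  simp only [List.any_eq_true, PySem.Str.isIn_iff_infix, PySem.Str.toList_lower,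
    List.mem_map]
  constructor
  · rintro ⟨k, hk, h⟩; exact ⟨k.toList, ⟨k, hk, rfl⟩, h⟩
  · rintro ⟨_, ⟨k, hk, rfl⟩, h⟩; exact ⟨k, hk, h⟩
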